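-- pv_equiv track=rewrite | github.com/MikeLynagh/NationalAIHackathon | energy_advisor_mvp/src/llm_integration.py | _mock_gemini_response
-- ===== SOURCE A (Python) =====
-- def _mock_gemini_response(user_input: str) -> str:
--     """Mock response for when API is not available - enhanced with more patterns"""
--     user_input = user_input.lower()
--
--     # Handle "stop all" or "turn off all" commands
--     if any(phrase in user_input for phrase in ["stop all", "turn off all", "shut down all", "off all"]):
--         return '{"intent": "turn_off", "device": "all", "action": "off", "time": null, "confidence": 0.9}'
--
--     if "turn on" in user_input or "switch on" in user_input or "start" in user_input:
--         if "lights" in user_input: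
--             return '{"intent": "turn_on", "device": "lights", "action": "on", "time": null, "confidence": 0.95}'
--         elif "dishwasher" in user_input:
--             return '{"intent": "turn_on", "device": "dishwasher", "action": "on", "time": null, "confidence": 0.95}'
--         elif "coffee" in user_input:
--             return '{"intent": "turn_on", "device": "coffee maker", "action": "on", "time": null, "confidence": 0.94}'
--         elif "heater" in user_input:
--             return '{"intent": "turn_on", "device": "heater", "action": "on", "time": null, "confidence": 0.93}'
--         elif "dryer" in user_input:
--             return '{"intent": "turn_on", "device": "dryer", "action": "on", "time": null, "confidence": 0.93}'
--         elif "ev" in user_input or "charger" in user_input: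
--             return '{"intent": "turn_on", "device": "ev charger", "action": "on", "time": null, "confidence": 0.93}'
--     elif "turn off" in user_input or "switch off" in user_input or "stop" in user_input:
--         if "lights" in user_input:
--             return '{"intent": "turn_off", "device": "lights", "action": "off", "time": null, "confidence": 0.95}'
--         elif "dishwasher" in user_input:
--             return '{"intent": "turn_off", "device": "dishwasher", "action": "off", "time": null, "confidence": 0.95}'
--         elif "heater" in user_input:
--             return '{"intent": "turn_off", "device": "heater", "action": "off", "time": null, "confidence": 0.93}'
--         elif "dryer" in user_input:
--             return '{"intent": "turn_off", "device": "dryer", "action": "off", "time": null, "confidence": 0.93}'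
--     elif "set" in user_input or "schedule" in user_input:
--         if "dishwasher" in user_input:
--             if any(time_phrase in user_input for time_phrase in ["14:00", "2pm", "2 pm"]):
--                 return '{"intent": "schedule", "device": "dishwasher", "action": "schedule", "time": "14:00", "confidence": 0.92}'
--             else:
--                 return '{"intent": "schedule", "device": "dishwasher", "action": "schedule", "time": null, "confidence": 0.85}'
--         elif "coffee" in user_input:
--             if any(time_phrase in user_input for time_phrase in ["7:00", "7am", "7 am"]):
--                 return '{"intent": "schedule", "device": "coffee maker", "action": "schedule", "time": "7:00", "confidence": 0.92}'
--             else: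
--                 return '{"intent": "schedule", "device": "coffee maker", "action": "schedule", "time": null, "confidence": 0.85}'
--         elif "dryer" in user_input:
--             if any(time_phrase in user_input for time_phrase in ["16:00", "4pm", "4 pm"]):
--                 return '{"intent": "schedule", "device": "dryer", "action": "schedule", "time": "16:00", "confidence": 0.92}'
--             else:
--                 return '{"intent": "schedule", "device": "dryer", "action": "schedule", "time": null, "confidence": 0.85}'
--         elif "heater" in user_input:
--             if any(time_phrase in user_input for time_phrase in ["18:00", "6pm", "6 pm"]):
--                 return '{"intent": "schedule", "device": "heater", "action": "schedule", "time": "18:00", "confidence": 0.92}'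
--             else:
--                 return '{"intent": "schedule", "device": "heater", "action": "schedule", "time": null, "confidence": 0.85}'
--
--     return '{"intent": "unknown", "device": null, "action": null, "time": null, "confidence": 0.2}'
-- ===== SOURCE B (Python) =====
-- _ALL_OFF = '{"intent": "turn_off", "device": "all", "action": "off", "time": null, "confidence": 0.9}'
-- _UNKNOWN = '{"intent": "unknown", "device": null, "action": null, "time": null, "confidence": 0.2}'
--
--
-- def _on(device, conf):
--     return '{"intent": "turn_on", "device": "%s", "action": "on", "time": null, "confidence": %s}' % (device, conf)
--
--
-- def _off(device, conf):
--     return '{"intent": "turn_off", "device": "%s", "action": "off", "time": null, "confidence": %s}' % (device, conf)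
--
--
-- def _sched(device, time, conf):
--     return '{"intent": "schedule", "device": "%s", "action": "schedule", "time": %s, "confidence": %s}' % (device, time, conf)
--
--
-- # Rule table: ordered groups of (trigger substrings, ordered rules).
-- # The first group with any trigger present is selected; within it, the first
-- # rule whose required substrings are all present gives the response.
-- _GROUPS = [
--     (["stop all", "turn off all", "shut down all", "off all"],
--      [([], _ALL_OFF)]),
--     (["turn on", "switch on", "start"],
--      [(["lights"], _on("lights", "0.95")),
--       (["dishwasher"], _on("dishwasher", "0.95")),
--       (["coffee"], _on("coffee maker", "0.94")),
--       (["heater"], _on("heater", "0.93")),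
--       (["dryer"], _on("dryer", "0.93")),
--       (["ev"], _on("ev charger", "0.93")),
--       (["charger"], _on("ev charger", "0.93"))]),
--     (["turn off", "switch off", "stop"],
--      [(["lights"], _off("lights", "0.95")),
--       (["dishwasher"], _off("dishwasher", "0.95")),
--       (["heater"], _off("heater", "0.93")),
--       (["dryer"], _off("dryer", "0.93"))]),
--     (["set", "schedule"],
--      [(["dishwasher", "14:00"], _sched("dishwasher", '"14:00"', "0.92")),
--       (["dishwasher", "2pm"], _sched("dishwasher", '"14:00"', "0.92")),
--       (["dishwasher", "2 pm"], _sched("dishwasher", '"14:00"', "0.92")),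
--       (["dishwasher"], _sched("dishwasher", "null", "0.85")),
--       (["coffee", "7:00"], _sched("coffee maker", '"7:00"', "0.92")),
--       (["coffee", "7am"], _sched("coffee maker", '"7:00"', "0.92")),
--       (["coffee", "7 am"], _sched("coffee maker", '"7:00"', "0.92")),
--       (["coffee"], _sched("coffee maker", "null", "0.85")),
--       (["dryer", "16:00"], _sched("dryer", '"16:00"', "0.92")),
--       (["dryer", "4pm"], _sched("dryer", '"16:00"', "0.92")),
--       (["dryer", "4 pm"], _sched("dryer", '"16:00"', "0.92")),
--       (["dryer"], _sched("dryer", "null", "0.85")),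
--       (["heater", "18:00"], _sched("heater", '"18:00"', "0.92")),
--       (["heater", "6pm"], _sched("heater", '"18:00"', "0.92")),
--       (["heater", "6 pm"], _sched("heater", '"18:00"', "0.92")),
--       (["heater"], _sched("heater", "null", "0.85"))]),
-- ]
--
--
-- def _mock_gemini_response(user_input: str) -> str:
--     text = user_input.lower()
--     for triggers, rules in _GROUPS:
--         if any(t in text for t in triggers):
--             for needed, response in rules:
--                 if all(s in text for s in needed):
--                     return response
--             break
--     return _UNKNOWN
-- ===== Notes on version B (the rewrite author's own statement) =====
-- stated objective: simpler
-- what changed: Replaces the nested if/elif decision tree with one ordered data table of (trigger substrings, rules) groups scanned by a single generic two-loop matcher; responses are built by shared formatters instead of repeated literals.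
import Mathlib
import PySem

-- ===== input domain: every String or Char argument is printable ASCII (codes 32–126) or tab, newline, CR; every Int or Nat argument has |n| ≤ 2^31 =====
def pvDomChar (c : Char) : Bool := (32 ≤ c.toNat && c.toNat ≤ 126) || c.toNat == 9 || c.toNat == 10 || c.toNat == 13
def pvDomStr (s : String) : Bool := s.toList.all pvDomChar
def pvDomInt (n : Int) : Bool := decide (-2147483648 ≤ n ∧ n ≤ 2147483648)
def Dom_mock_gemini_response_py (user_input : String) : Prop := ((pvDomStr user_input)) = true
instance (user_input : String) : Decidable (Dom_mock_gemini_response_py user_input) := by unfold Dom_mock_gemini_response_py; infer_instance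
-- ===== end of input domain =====

-- B replaces A's nested if/elif tree by one ordered rule table (groups of trigger
-- substrings with ordered all-substrings-present rules) scanned by a generic matcher; simpler, same cost.

-- ===== PORT A =====
-- Literal transliteration of A's nested if/elif tree; `sub in text` is PySem.Str.isIn.
def mock_gemini_response_py (user_input : String) : String :=
  let t := PySem.Str.lower user_input
  -- any(phrase in user_input for phrase in [...])
  if ["stop all", "turn off all", "shut down all", "off all"].any (fun p => PySem.Str.isIn p t) then
    "{\"intent\": \"turn_off\", \"device\": \"all\", \"action\": \"off\", \"time\": null, \"confidence\": 0.9}"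
  else if PySem.Str.isIn "turn on" t || PySem.Str.isIn "switch on" t || PySem.Str.isIn "start" t then
    (if PySem.Str.isIn "lights" t then
      "{\"intent\": \"turn_on\", \"device\": \"lights\", \"action\": \"on\", \"time\": null, \"confidence\": 0.95}"
    else if PySem.Str.isIn "dishwasher" t then
      "{\"intent\": \"turn_on\", \"device\": \"dishwasher\", \"action\": \"on\", \"time\": null, \"confidence\": 0.95}"
    else if PySem.Str.isIn "coffee" t then
      "{\"intent\": \"turn_on\", \"device\": \"coffee maker\", \"action\": \"on\", \"time\": null, \"confidence\": 0.94}"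
    else if PySem.Str.isIn "heater" t then
      "{\"intent\": \"turn_on\", \"device\": \"heater\", \"action\": \"on\", \"time\": null, \"confidence\": 0.93}"
    else if PySem.Str.isIn "dryer" t then
      "{\"intent\": \"turn_on\", \"device\": \"dryer\", \"action\": \"on\", \"time\": null, \"confidence\": 0.93}"
    else if PySem.Str.isIn "ev" t || PySem.Str.isIn "charger" t then
      "{\"intent\": \"turn_on\", \"device\": \"ev charger\", \"action\": \"on\", \"time\": null, \"confidence\": 0.93}"
    else
      "{\"intent\": \"unknown\", \"device\": null, \"action\": null, \"time\": null, \"confidence\": 0.2}")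
  else if PySem.Str.isIn "turn off" t || PySem.Str.isIn "switch off" t || PySem.Str.isIn "stop" t then
    (if PySem.Str.isIn "lights" t then
      "{\"intent\": \"turn_off\", \"device\": \"lights\", \"action\": \"off\", \"time\": null, \"confidence\": 0.95}"
    else if PySem.Str.isIn "dishwasher" t then
      "{\"intent\": \"turn_off\", \"device\": \"dishwasher\", \"action\": \"off\", \"time\": null, \"confidence\": 0.95}"
    else if PySem.Str.isIn "heater" t then
      "{\"intent\": \"turn_off\", \"device\": \"heater\", \"action\": \"off\", \"time\": null, \"confidence\": 0.93}"
    else if PySem.Str.isIn "dryer" t then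
      "{\"intent\": \"turn_off\", \"device\": \"dryer\", \"action\": \"off\", \"time\": null, \"confidence\": 0.93}"
    else
      "{\"intent\": \"unknown\", \"device\": null, \"action\": null, \"time\": null, \"confidence\": 0.2}")
  else if PySem.Str.isIn "set" t || PySem.Str.isIn "schedule" t then
    (if PySem.Str.isIn "dishwasher" t then
      (if ["14:00", "2pm", "2 pm"].any (fun p => PySem.Str.isIn p t) then
        "{\"intent\": \"schedule\", \"device\": \"dishwasher\", \"action\": \"schedule\", \"time\": \"14:00\", \"confidence\": 0.92}"
      else
        "{\"intent\": \"schedule\", \"device\": \"dishwasher\", \"action\": \"schedule\", \"time\": null, \"confidence\": 0.85}")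
    else if PySem.Str.isIn "coffee" t then
      (if ["7:00", "7am", "7 am"].any (fun p => PySem.Str.isIn p t) then
        "{\"intent\": \"schedule\", \"device\": \"coffee maker\", \"action\": \"schedule\", \"time\": \"7:00\", \"confidence\": 0.92}"
      else
        "{\"intent\": \"schedule\", \"device\": \"coffee maker\", \"action\": \"schedule\", \"time\": null, \"confidence\": 0.85}")
    else if PySem.Str.isIn "dryer" t then
      (if ["16:00", "4pm", "4 pm"].any (fun p => PySem.Str.isIn p t) then
        "{\"intent\": \"schedule\", \"device\": \"dryer\", \"action\": \"schedule\", \"time\": \"16:00\", \"confidence\": 0.92}"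
      else
        "{\"intent\": \"schedule\", \"device\": \"dryer\", \"action\": \"schedule\", \"time\": null, \"confidence\": 0.85}")
    else if PySem.Str.isIn "heater" t then
      (if ["18:00", "6pm", "6 pm"].any (fun p => PySem.Str.isIn p t) then
        "{\"intent\": \"schedule\", \"device\": \"heater\", \"action\": \"schedule\", \"time\": \"18:00\", \"confidence\": 0.92}"
      else
        "{\"intent\": \"schedule\", \"device\": \"heater\", \"action\": \"schedule\", \"time\": null, \"confidence\": 0.85}")
    else
      "{\"intent\": \"unknown\", \"device\": null, \"action\": null, \"time\": null, \"confidence\": 0.2}")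
  else
    "{\"intent\": \"unknown\", \"device\": null, \"action\": null, \"time\": null, \"confidence\": 0.2}"

-- ===== PORT B =====
-- B's rule table and generic matcher (transliteration of Source B).
def pvUnknown : String :=
  "{\"intent\": \"unknown\", \"device\": null, \"action\": null, \"time\": null, \"confidence\": 0.2}"

def pvOn (device conf : String) : String :=
  "{\"intent\": \"turn_on\", \"device\": \"" ++ device ++ "\", \"action\": \"on\", \"time\": null, \"confidence\": " ++ conf ++ "}"

def pvOff (device conf : String) : String :=
  "{\"intent\": \"turn_off\", \"device\": \"" ++ device ++ "\", \"action\": \"off\", \"time\": null, \"confidence\": " ++ conf ++ "}"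

def pvSched (device time conf : String) : String :=
  "{\"intent\": \"schedule\", \"device\": \"" ++ device ++ "\", \"action\": \"schedule\", \"time\": " ++ time ++ ", \"confidence\": " ++ conf ++ "}"

def pvGroups : List (List String × List (List String × String)) :=
  [ (["stop all", "turn off all", "shut down all", "off all"],
      [([], pvOff "all" "0.9")]),
    (["turn on", "switch on", "start"],
      [(["lights"], pvOn "lights" "0.95"),
       (["dishwasher"], pvOn "dishwasher" "0.95"),
       (["coffee"], pvOn "coffee maker" "0.94"),
       (["heater"], pvOn "heater" "0.93"),
       (["dryer"], pvOn "dryer" "0.93"),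
       (["ev"], pvOn "ev charger" "0.93"),
       (["charger"], pvOn "ev charger" "0.93")]),
    (["turn off", "switch off", "stop"],
      [(["lights"], pvOff "lights" "0.95"),
       (["dishwasher"], pvOff "dishwasher" "0.95"),
       (["heater"], pvOff "heater" "0.93"),
       (["dryer"], pvOff "dryer" "0.93")]),
    (["set", "schedule"],
      [(["dishwasher", "14:00"], pvSched "dishwasher" "\"14:00\"" "0.92"),
       (["dishwasher", "2pm"], pvSched "dishwasher" "\"14:00\"" "0.92"),
       (["dishwasher", "2 pm"], pvSched "dishwasher" "\"14:00\"" "0.92"),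
       (["dishwasher"], pvSched "dishwasher" "null" "0.85"),
       (["coffee", "7:00"], pvSched "coffee maker" "\"7:00\"" "0.92"),
       (["coffee", "7am"], pvSched "coffee maker" "\"7:00\"" "0.92"),
       (["coffee", "7 am"], pvSched "coffee maker" "\"7:00\"" "0.92"),
       (["coffee"], pvSched "coffee maker" "null" "0.85"),
       (["dryer", "16:00"], pvSched "dryer" "\"16:00\"" "0.92"),
       (["dryer", "4pm"], pvSched "dryer" "\"16:00\"" "0.92"),
       (["dryer", "4 pm"], pvSched "dryer" "\"16:00\"" "0.92"),
       (["dryer"], pvSched "dryer" "null" "0.85"),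
       (["heater", "18:00"], pvSched "heater" "\"18:00\"" "0.92"),
       (["heater", "6pm"], pvSched "heater" "\"18:00\"" "0.92"),
       (["heater", "6 pm"], pvSched "heater" "\"18:00\"" "0.92"),
       (["heater"], pvSched "heater" "null" "0.85")]) ]

-- inner loop: first rule whose required substrings are all present, else fall through to unknown
def pvScanRules (text : String) : List (List String × String) → String
  | [] => pvUnknown
  | (needed, response) :: rest =>
    if needed.all (fun s => PySem.Str.isIn s text) then response else pvScanRules text rest

-- outer loop: first group with any trigger present selects its rules
def pvScanGroups (text : String) : List (List String × List (List String × String)) → String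
  | [] => pvUnknown
  | (triggers, rules) :: rest =>
    if triggers.any (fun tr => PySem.Str.isIn tr text) then pvScanRules text rules
    else pvScanGroups text rest

def mock_gemini_response_py_alt (user_input : String) : String :=
  pvScanGroups (PySem.Str.lower user_input) pvGroups

-- ===== PRECONDITION & SPEC =====
def Spec_mock_gemini_response_py (user_input : String) (out : String) : Prop := out = mock_gemini_response_py_alt user_input
instance (user_input : String) (out : String) : Decidable (Spec_mock_gemini_response_py user_input out) := by unfold Spec_mock_gemini_response_py; infer_instance

-- ===== CLAIM (what is proved, stated in full; the proofs are below) =====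
def Claim_equal_mock_gemini_response_py : Prop := ∀ (user_input : String), Dom_mock_gemini_response_py user_input → Spec_mock_gemini_response_py user_input (mock_gemini_response_py user_input)

-- ===== LEMMAS AND PROOFS =====

-- -- 'if a or b then x else y' versus two chained single-trigger rules (A's merged ev/charger branch)
theorem pv_if_or {α : Type} (a b : Bool) (x y : α) :
    (if a then x else if b then x else y) = if a || b then x else y := by
  cases a <;> simp

-- B's four flat device+time rules versus A's nested device-then-any-time test
theorem pv_if_and_chain {α : Type} (d c1 c2 c3 : Bool) (T D rest : α) :
    (if d && c1 then T else if d && c2 then T else if d && c3 then T else if d then D else rest)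
      = if d then (if c1 || (c2 || c3) then T else D) else rest := by
  cases d <;> cases c1 <;> cases c2 <;> cases c3 <;> simp

-- ===== VERDICT (by name: the statement is the Claim_ definition above) =====
set_option maxHeartbeats 1000000 in
theorem mock_gemini_response_py_spec : Claim_equal_mock_gemini_response_py := by
  intro u _
  unfold Spec_mock_gemini_response_py mock_gemini_response_py mock_gemini_response_py_alt
  simp only [pvGroups, pvScanGroups, pvScanRules, List.any_cons, List.any_nil, List.all_cons,
    List.all_nil, Bool.and_true, Bool.or_false, Bool.or_assoc,
    pvUnknown, pvOn, pvOff, pvSched, String.reduceAppend]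
  simp only [pv_if_and_chain]
  simp only [pv_if_or, if_true]
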